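-- pv_equiv track=rewrite | github.com/ai4prod/ai4prod_ui | web_ui/web_app/app/home/views_training.py | move_specific_keys_to_first
-- ===== SOURCE A (Python) =====
-- def move_specific_keys_to_first(dictionary,
--                                 keys_to_move,
--                                 include_others=False):
--     moved_items = [(key, dictionary[key]) for key in keys_to_move if key in dictionary]
--     remaining_items=[]
--     if include_others:
--         remaining_items = [(key, value) for key, value in dictionary.items() if key not in keys_to_move]
--
--     new_dict = dict(moved_items + remaining_items)
--
--     return new_dict
-- ===== SOURCE B (Python) =====
-- def move_specific_keys_to_first(dictionary,
--                                 keys_to_move,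
--                                 include_others=False):
--     # rank: each distinct key of keys_to_move -> its first-occurrence rank 0,1,2,...
--     rank = {}
--     for key in keys_to_move:
--         rank.setdefault(key, len(rank))
--     if include_others:
--         # give every other dictionary key a rank after all moved ones, in dict order
--         for key in dictionary:
--             rank.setdefault(key, len(rank))
--         selected = list(dictionary.items())
--     else:
--         selected = [item for item in dictionary.items() if item[0] in rank]
--     selected.sort(key=lambda item: rank[item[0]])
--     return dict(selected)
-- ===== Notes on version B (the rewrite author's own statement) =====
-- stated objective: alternative
-- what changed: A concatenates a keys_to_move scan with a dict scan whose filter rescans the keys_to_move list per item; B builds a first-occurrence rank table with setdefault and stably sorts the dictionary items by rank, so the output order comes from one keyed sort instead of list concatenation.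
import Mathlib
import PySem

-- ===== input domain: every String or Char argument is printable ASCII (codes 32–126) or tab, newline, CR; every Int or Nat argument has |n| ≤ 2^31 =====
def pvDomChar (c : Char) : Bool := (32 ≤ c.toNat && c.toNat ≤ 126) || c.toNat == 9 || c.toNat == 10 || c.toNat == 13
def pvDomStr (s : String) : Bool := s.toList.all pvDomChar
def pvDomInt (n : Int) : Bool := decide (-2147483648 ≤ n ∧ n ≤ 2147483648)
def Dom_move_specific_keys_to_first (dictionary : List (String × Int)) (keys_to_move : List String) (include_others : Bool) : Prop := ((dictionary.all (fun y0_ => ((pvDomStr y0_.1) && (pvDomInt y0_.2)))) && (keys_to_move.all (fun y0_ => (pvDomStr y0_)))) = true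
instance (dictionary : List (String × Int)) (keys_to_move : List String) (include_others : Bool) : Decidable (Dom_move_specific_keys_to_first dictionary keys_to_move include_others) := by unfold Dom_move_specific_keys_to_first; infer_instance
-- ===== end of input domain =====

-- B replaces A's two-comprehension concatenation by a first-occurrence rank table built with
-- setdefault plus one stable sort of the dictionary items by rank (objective: alternative).

-- ===== PORT A =====
def move_specific_keys_to_first (dictionary : List (String × Int)) (keys_to_move : List String) (include_others : Bool) : List (String × Int) :=
  let d : PySem.Dict String Int := PySem.Dict.mk dictionary
  let moved_items : List (String × Int) :=
    keys_to_move.filterMap (fun key => (d.get? key).map (fun v => (key, v)))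
  let remaining_items : List (String × Int) :=
    if include_others then d.items.filter (fun p => !(keys_to_move.contains p.1))
    else []
  (PySem.Dict.ofList (moved_items ++ remaining_items)).items

-- ===== PORT B =====
def move_specific_keys_to_first_alt (dictionary : List (String × Int)) (keys_to_move : List String) (include_others : Bool) : List (String × Int) :=
  let d : PySem.Dict String Int := PySem.Dict.mk dictionary
  let rank0 : PySem.Dict String Int :=
    keys_to_move.foldl (fun r key => r.setdefault key (r.size : Int)) PySem.Dict.empty
  let rank : PySem.Dict String Int :=
    if include_others then d.keys.foldl (fun r key => r.setdefault key (r.size : Int)) rank0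
    else rank0
  let selected : List (String × Int) :=
    if include_others then d.items
    else d.items.filter (fun item => rank.contains item.1)
  -- rank[item[0]]: every selected item's key is present in rank, so the .getD 0 default is never read
  let sortedSel := PySem.List.sorted selected (fun item => (rank.get? item.1).getD 0)
  (PySem.Dict.ofList sortedSel).items

-- ===== PRECONDITION & SPEC =====
-- Pre_ requires pairwise-distinct keys in the association list: the argument stands for a Python
-- dict, whose keys are necessarily distinct, so a list with a repeated key represents no Python input.
def Pre_move_specific_keys_to_first (dictionary : List (String × Int)) (keys_to_move : List String) (include_others : Bool) : Prop :=
  (dictionary.map Prod.fst).Nodup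
instance (dictionary : List (String × Int)) (keys_to_move : List String) (include_others : Bool) : Decidable (Pre_move_specific_keys_to_first dictionary keys_to_move include_others) := by unfold Pre_move_specific_keys_to_first; infer_instance

def pvWitness_move_specific_keys_to_first : (List (String × Int)) × List String × Bool :=
  ([("a", 1), ("b", 2), ("c", 3)], ["b", "z", "b"], true)

def Spec_move_specific_keys_to_first (dictionary : List (String × Int)) (keys_to_move : List String) (include_others : Bool) (out : List (String × Int)) : Prop := out = move_specific_keys_to_first_alt dictionary keys_to_move include_others
instance (dictionary : List (String × Int)) (keys_to_move : List String) (include_others : Bool) (out : List (String × Int)) : Decidable (Spec_move_specific_keys_to_first dictionary keys_to_move include_others out) := by unfold Spec_move_specific_keys_to_first; infer_instance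

-- ===== CLAIM (what is proved, stated in full; the proofs are below) =====
def Claim_equal_move_specific_keys_to_first : Prop := ∀ (dictionary : List (String × Int)) (keys_to_move : List String) (include_others : Bool), Dom_move_specific_keys_to_first dictionary keys_to_move include_others → Pre_move_specific_keys_to_first dictionary keys_to_move include_others → Spec_move_specific_keys_to_first dictionary keys_to_move include_others (move_specific_keys_to_first dictionary keys_to_move include_others)

-- ===== LEMMAS AND PROOFS =====

-- dedup of a key list, given an already-seen set
def pvDedupS (l : List String) (seen : List String) : List String :=
  match l with
  | [] => []
  | k :: l => if k ∈ seen then pvDedupS l seen else k :: pvDedupS l (k :: seen)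

-- dedup of an association list by key, given an already-seen key set
def pvDedupK (xs : List (String × Int)) (seen : List String) : List (String × Int) :=
  match xs with
  | [] => []
  | p :: xs => if p.1 ∈ seen then pvDedupK xs seen else p :: pvDedupK xs (p.1 :: seen)

-- first-occurrence rank assignment: unseen keys of l get consecutive ranks starting at i
def pvAssign (l : List String) (seen : List String) (i : Int) : List (String × Int) :=
  match l with
  | [] => []
  | k :: l => if k ∈ seen then pvAssign l seen i else (k, i) :: pvAssign l (k :: seen) (i + 1)

-- canonical description shared by both sides
def pvF (dictionary : List (String × Int)) (k : String) : Option (String × Int) :=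
  ((PySem.Dict.mk dictionary).get? k).map (fun v => (k, v))
def pvMovedD (dictionary : List (String × Int)) (ktm : List String) : List (String × Int) :=
  (pvDedupS ktm []).filterMap (pvF dictionary)
def pvOthers (dictionary : List (String × Int)) (ktm : List String) (io : Bool) : List (String × Int) :=
  if io then dictionary.filter (fun p => !(ktm.contains p.1)) else []

theorem pvDedupS_mem (l seen : List String) (x : String) :
    x ∈ pvDedupS l seen ↔ x ∈ l ∧ x ∉ seen := by
  induction l generalizing seen with
  | nil => simp [pvDedupS]
  | cons k l ih =>
    simp only [pvDedupS]
    split_ifs with h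
    · rw [ih]; simp only [List.mem_cons]
      constructor
      · rintro ⟨h1, h2⟩; exact ⟨Or.inr h1, h2⟩
      · rintro ⟨h1 | h1, h2⟩
        · exact absurd (h1 ▸ h) h2
        · exact ⟨h1, h2⟩
    · simp only [List.mem_cons, ih, List.mem_cons]
      constructor
      · rintro (rfl | ⟨h1, h2⟩)
        · exact ⟨Or.inl rfl, h⟩
        · exact ⟨Or.inr h1, fun hx => h2 (Or.inr hx)⟩
      · rintro ⟨rfl | h1, h2⟩
        · exact Or.inl rfl
        · by_cases hxk : x = k
          · exact Or.inl hxk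
          · exact Or.inr ⟨h1, fun hx => (by cases hx with | inl h => exact hxk h | inr h => exact h2 h : False)⟩


theorem pvDedupS_nodup (l seen : List String) : (pvDedupS l seen).Nodup := by
  induction l generalizing seen with
  | nil => simp [pvDedupS]
  | cons k l ih =>
    simp only [pvDedupS]
    split_ifs with h
    · exact ih seen
    · refine List.nodup_cons.mpr ⟨fun hk => ?_, ih (k :: seen)⟩
      exact ((pvDedupS_mem l (k :: seen) k).mp hk).2 (List.mem_cons_self)

theorem pvDedupK_congr (xs : List (String × Int)) (s s' : List String)
    (h : ∀ x ∈ xs.map Prod.fst, (x ∈ s ↔ x ∈ s')) :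
    pvDedupK xs s = pvDedupK xs s' := by
  induction xs generalizing s s' with
  | nil => rfl
  | cons p xs ih =>
    simp only [pvDedupK]
    have hp : p.1 ∈ s ↔ p.1 ∈ s' := h p.1 (by simp)
    by_cases h1 : p.1 ∈ s
    · rw [if_pos h1, if_pos (hp.mp h1)]
      exact ih s s' (fun x hx => h x (by simp [hx]))
    · rw [if_neg h1, if_neg (fun hx => h1 (hp.mpr hx))]
      rw [ih (p.1 :: s) (p.1 :: s') (fun x hx => by
        simp only [List.mem_cons]
        exact or_congr Iff.rfl (h x (by simp [hx])))]

theorem pvAssign_fst (l seen : List String) (i : Int) :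
    (pvAssign l seen i).map Prod.fst = pvDedupS l seen := by
  induction l generalizing seen i with
  | nil => rfl
  | cons k l ih =>
    simp only [pvAssign, pvDedupS]
    split_ifs with h
    · exact ih seen i
    · simp [ih]

theorem pvAssign_lb (l seen : List String) (i : Int) :
    ∀ p ∈ pvAssign l seen i, i ≤ p.2 := by
  induction l generalizing seen i with
  | nil => simp [pvAssign]
  | cons k l ih =>
    intro p hp
    simp only [pvAssign] at hp
    split_ifs at hp with h
    · exact ih seen i p hp
    · rcases List.mem_cons.mp hp with rfl | hp
      · exact le_refl i
      · exact le_trans (by omega) (ih (k :: seen) (i + 1) p hp)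

theorem pvAssign_ub (l seen : List String) (i : Int) :
    ∀ p ∈ pvAssign l seen i, p.2 < i + (pvAssign l seen i).length := by
  induction l generalizing seen i with
  | nil => simp [pvAssign]
  | cons k l ih =>
    intro p hp
    simp only [pvAssign] at hp ⊢
    split_ifs at hp ⊢ with h
    · exact ih seen i p hp
    · rcases List.mem_cons.mp hp with rfl | hp
      · simp only [List.length_cons]
        push_cast
        omega
      · have := ih (k :: seen) (i + 1) p hp
        simp only [List.length_cons]
        omega

theorem pvAssign_pairwise (l seen : List String) (i : Int) :
    (pvAssign l seen i).Pairwise (fun a b => a.2 < b.2) := by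
  induction l generalizing seen i with
  | nil => simp [pvAssign]
  | cons k l ih =>
    simp only [pvAssign]
    split_ifs with h
    · exact ih seen i
    · refine List.pairwise_cons.mpr ⟨fun p hp => ?_, ih (k :: seen) (i + 1)⟩
      have := pvAssign_lb l (k :: seen) (i + 1) p hp
      omega

-- the rank-building fold, characterised
theorem rank_items (l : List String) (r : PySem.Dict String Int) (s : List String)
    (hc : ∀ x, r.contains x = true ↔ x ∈ s) :
    (l.foldl (fun r key => r.setdefault key (r.size : Int)) r).items
      = r.items ++ pvAssign l s (r.size : Int) := by
  induction l generalizing r s with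
  | nil => simp [pvAssign]
  | cons k l ih =>
    simp only [List.foldl_cons, pvAssign]
    by_cases h : k ∈ s
    · rw [PySem.Dict.setdefault_of_contains r _ ((hc k).mpr h), if_pos h]
      exact ih r s hc
    · have hcf : r.contains k = false := by
        cases hck : r.contains k
        · rfl
        · exact absurd ((hc k).mp hck) h
      rw [if_neg h]
      have hsd : r.setdefault k (r.size : Int) = r.insert k (r.size : Int) :=
        PySem.Dict.setdefault_of_not_contains r _ hcf
      rw [hsd]
      have hitems := PySem.Dict.items_insert_of_not_contains r (r.size : Int) hcf
      have hsize : ((r.insert k (r.size : Int)).size : Int) = (r.size : Int) + 1 := by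
        have hlen : (r.insert k (r.size : Int)).items.length = r.items.length + 1 := by
          rw [hitems]; simp
        show ((r.insert k (r.size : Int)).items.length : Int) = (r.items.length : Int) + 1
        rw [hlen]; push_cast; ring
      have hc' : ∀ x, (r.insert k (r.size : Int)).contains x = true ↔ x ∈ k :: s := by
        intro x
        rw [PySem.Dict.contains_insert]
        simp only [Bool.or_eq_true, beq_iff_eq, List.mem_cons, hc x]
      rw [ih (r.insert k (r.size : Int)) (k :: s) hc', hitems, hsize]
      simp

-- the dict(...) fold, characterised: inserting a list whose key-collisions always carry
-- the same value dedups it by key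
theorem foldIns (xs : List (String × Int)) (d : PySem.Dict String Int)
    (hnd : d.keys.Nodup)
    (hconsist : ∀ p ∈ xs, ∀ v, d.get? p.1 = some v → v = p.2)
    (hpw : ∀ p ∈ xs, ∀ q ∈ xs, p.1 = q.1 → p.2 = q.2) :
    (xs.foldl (fun acc p => acc.insert p.1 p.2) d).items = d.items ++ pvDedupK xs d.keys := by
  induction xs generalizing d with
  | nil => simp [pvDedupK]
  | cons p xs ih =>
    simp only [List.foldl_cons, pvDedupK]
    by_cases h : p.1 ∈ d.keys
    · -- key present: the stored value is p.2, so the insert is a no-op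
      have hct : d.contains p.1 = true := (PySem.Dict.contains_iff_mem_keys d p.1).mpr h
      have hsome : d.get? p.1 = some p.2 := by
        have hs : (d.get? p.1).isSome = true := by
          rw [← PySem.Dict.contains_eq_isSome_get? d p.1]; exact hct
        rcases Option.isSome_iff_exists.mp hs with ⟨v, hv⟩
        rw [hv, hconsist p (by simp) v hv]
      have heq : d.insert p.1 p.2 = d := by
        apply PySem.Dict.ext
        rw [PySem.Dict.items_insert_of_contains d p.2 hct]
        refine (List.map_congr_left ?_).trans (List.map_id d.items)
        intro q hq
        by_cases hqp : q.1 = p.1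
        · have hq2 : d.get? q.1 = some q.2 := PySem.Dict.get?_of_mem_items d (by simpa using hq) hnd
          rw [hqp, hsome] at hq2
          have hv2 : q.2 = p.2 := (Option.some.inj hq2).symm
          rw [if_pos (show (q.1 == p.1) = true from beq_iff_eq.mpr hqp)]
          show (p.1, p.2) = q
          obtain ⟨q1, q2⟩ := q
          simp only at hqp hv2
          rw [hqp, hv2]
        · rw [if_neg (by simpa using hqp)]
          rfl
      rw [if_pos h, heq]
      exact ih d hnd (fun q hq v hv => hconsist q (by simp [hq]) v hv)
        (fun a ha b hb hab => hpw a (by simp [ha]) b (by simp [hb]) hab)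
    · have hcf : d.contains p.1 = false := by
        cases hck : d.contains p.1
        · rfl
        · exact absurd ((PySem.Dict.contains_iff_mem_keys d p.1).mp hck) h
      rw [if_neg h]
      have hitems := PySem.Dict.items_insert_of_not_contains d p.2 hcf
      have hkeys := PySem.Dict.keys_insert_of_not_contains d p.2 hcf
      have hnd' : (d.insert p.1 p.2).keys.Nodup := PySem.Dict.nodup_keys_insert d p.1 p.2 hnd
      have hcons' : ∀ q ∈ xs, ∀ v, (d.insert p.1 p.2).get? q.1 = some v → v = q.2 := by
        intro q hq v hv
        rw [PySem.Dict.get?_insert] at hv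
        split_ifs at hv with hqp
        · have h2 := hpw p (by simp) q (by simp [hq]) hqp.symm
          rw [← Option.some.inj hv, h2]
        · exact hconsist q (by simp [hq]) v hv
      have ihr := ih (d.insert p.1 p.2) hnd' hcons'
        (fun a ha b hb hab => hpw a (by simp [ha]) b (by simp [hb]) hab)
      rw [ihr, hitems, hkeys]
      rw [pvDedupK_congr xs (d.keys ++ [p.1]) (p.1 :: d.keys) (fun x _ => by
        simp only [List.mem_append, List.mem_cons]
        tauto)]
      simp

theorem mem_filterMapF (g : String → Option Int) (l : List String) (p : String × Int) :
    p ∈ l.filterMap (fun k => (g k).map (fun v => (k, v))) ↔ p.1 ∈ l ∧ g p.1 = some p.2 := by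
  rw [List.mem_filterMap]
  constructor
  · rintro ⟨k, hk, hfk⟩
    cases hg : g k with
    | none => rw [hg] at hfk; simp at hfk
    | some v =>
      rw [hg] at hfk
      simp only [Option.map_some, Option.some.injEq] at hfk
      rw [← hfk]
      exact ⟨hk, hg⟩
  · rintro ⟨hk, hg⟩
    exact ⟨p.1, hk, by rw [hg]; simp⟩

theorem filterMapF_fst (g : String → Option Int) (l : List String) :
    (l.filterMap (fun k => (g k).map (fun v => (k, v)))).map Prod.fst
      = l.filter (fun k => (g k).isSome) := by
  induction l with
  | nil => rfl
  | cons k l ih =>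
    simp only [List.filterMap_cons, List.filter_cons]
    cases hg : g k with
    | none => simpa [hg] using ih
    | some v => simpa [hg] using ih

theorem mapfst_filter (L : List (String × Int)) (pred : String → Bool) :
    (L.filter (fun q => pred q.1)).map Prod.fst = (L.map Prod.fst).filter pred := by
  induction L with
  | nil => rfl
  | cons p L ih =>
    simp only [List.filter_cons, List.map_cons]
    cases h : pred p.1 <;> simp [h, ih]

theorem pvDedupK_filterMap (g : String → Option Int) (l s : List String) :
    pvDedupK (l.filterMap (fun k => (g k).map (fun v => (k, v)))) s
      = (pvDedupS l s).filterMap (fun k => (g k).map (fun v => (k, v))) := by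
  induction l generalizing s with
  | nil => rfl
  | cons k l ih =>
    simp only [List.filterMap_cons, pvDedupS]
    cases hg : g k with
    | none =>
      simp only [Option.map_none]
      by_cases hks : k ∈ s
      · rw [if_pos hks, ih s]
      · rw [if_neg hks]
        simp only [List.filterMap_cons, hg, Option.map_none]
        rw [← ih (k :: s)]
        apply pvDedupK_congr
        intro x hx
        rcases List.mem_map.mp hx with ⟨p, hp, rfl⟩
        have := (mem_filterMapF g l p).mp hp
        have hxk : p.1 ≠ k := fun he => by
          have h2 := this.2
          rw [he, hg] at h2
          simp at h2
        simp [hxk]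
    | some v =>
      simp only [Option.map_some, pvDedupK]
      by_cases hks : k ∈ s
      · rw [if_pos hks, if_pos hks, ih s]
      · rw [if_neg hks, if_neg hks]
        simp only [List.filterMap_cons, hg, Option.map_some]
        rw [ih (k :: s)]

theorem pvDedupK_id (ys : List (String × Int)) (s : List String)
    (hnd : (ys.map Prod.fst).Nodup) (h : ∀ k ∈ ys.map Prod.fst, k ∉ s) :
    pvDedupK ys s = ys := by
  induction ys generalizing s with
  | nil => rfl
  | cons p ys ih =>
    simp only [pvDedupK]
    rw [if_neg (h p.1 (by simp))]
    simp only [List.map_cons, List.nodup_cons] at hnd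
    congr 1
    apply ih _ hnd.2
    intro k hk
    simp only [List.mem_cons]
    rintro (rfl | hks)
    · exact hnd.1 hk
    · exact h k (by simp [hk]) hks

theorem pvDedupK_append (xs ys : List (String × Int)) (s : List String)
    (hnd : (ys.map Prod.fst).Nodup)
    (h : ∀ k ∈ ys.map Prod.fst, k ∉ s ∧ k ∉ xs.map Prod.fst) :
    pvDedupK (xs ++ ys) s = pvDedupK xs s ++ ys := by
  induction xs generalizing s with
  | nil =>
    simp only [List.nil_append, pvDedupK]
    exact pvDedupK_id ys s hnd (fun k hk => (h k hk).1)
  | cons p xs ih =>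
    simp only [List.cons_append, pvDedupK]
    by_cases hps : p.1 ∈ s
    · rw [if_pos hps, if_pos hps]
      exact ih s (fun k hk => ⟨(h k hk).1, fun hx => (h k hk).2 (by simp [hx])⟩)
    · rw [if_neg hps, if_neg hps, List.cons_append]
      congr 1
      apply ih (p.1 :: s)
      intro k hk
      have := h k hk
      refine ⟨fun hx => ?_, fun hx => this.2 (by simp [hx])⟩
      rcases List.mem_cons.mp hx with rfl | hx
      · exact this.2 (by simp)
      · exact this.1 hx

theorem pvDedupS_eq_filter (l s : List String) (hnd : l.Nodup) :
    pvDedupS l s = l.filter (fun k => decide (k ∉ s)) := by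
  induction l generalizing s with
  | nil => rfl
  | cons k l ih =>
    simp only [pvDedupS, List.filter_cons, List.nodup_cons] at *
    by_cases hks : k ∈ s
    · rw [if_pos hks]
      simp only [hks, not_true, decide_false]
      exact ih s hnd.2
    · rw [if_neg hks]
      simp only [hks, not_false_iff, decide_true]
      congr 1
      rw [ih (k :: s) hnd.2]
      apply List.filter_congr
      intro x hx
      have hxk : x ≠ k := fun he => hnd.1 (he ▸ hx)
      simp [hxk]

-- lookups along aligned key lists inherit strict rank order
theorem transport (R : PySem.Dict String Int) (hnd : R.keys.Nodup)
    (ys ranks : List (String × Int))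
    (hfst : ys.map Prod.fst = ranks.map Prod.fst) (hsub : ranks.Sublist R.items)
    (hpw : ranks.Pairwise (fun a b => a.2 < b.2)) :
    ys.Pairwise (fun p q => (R.get? p.1).getD 0 < (R.get? q.1).getD 0) := by
  have h1 : ranks.Pairwise (fun a b => (R.get? a.1).getD 0 < (R.get? b.1).getD 0) := by
    refine hpw.imp_of_mem ?_
    intro a b ha hb hab
    have hga : R.get? a.1 = some a.2 := PySem.Dict.get?_of_mem_items R (by simpa using hsub.subset ha) hnd
    have hgb : R.get? b.1 = some b.2 := PySem.Dict.get?_of_mem_items R (by simpa using hsub.subset hb) hnd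
    rw [hga, hgb]
    simpa using hab
  have h2 : (ranks.map Prod.fst).Pairwise (fun k k' => (R.get? k).getD 0 < (R.get? k').getD 0) :=
    List.pairwise_map.mpr h1
  rw [← hfst] at h2
  exact (List.pairwise_map (R := fun k k' => (R.get? k).getD 0 < (R.get? k').getD 0)).mp h2

theorem memget (dictionary : List (String × Int)) (hn : (dictionary.map Prod.fst).Nodup)
    (p : String × Int) :
    (PySem.Dict.mk dictionary).get? p.1 = some p.2 ↔ p ∈ dictionary := by
  constructor
  · intro h
    have := PySem.Dict.mem_items_of_get?_eq_some (PySem.Dict.mk dictionary) h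
    simpa [PySem.Dict.items] using this
  · intro h
    exact PySem.Dict.get?_of_mem_items (PySem.Dict.mk dictionary) (by simpa using h) (by simpa [PySem.Dict.keys] using hn)

theorem ofList_items (ys : List (String × Int)) (h : (ys.map Prod.fst).Nodup) :
    (PySem.Dict.ofList ys).items = ys := by
  have := PySem.Dict.items_foldl_insert_fresh ys Prod.fst Prod.snd PySem.Dict.empty
    (fun a _ => rfl) h
  simpa [PySem.Dict.ofList, PySem.Dict.update] using this

theorem sideA (dictionary : List (String × Int)) (ktm : List String) (io : Bool)
    (hn : (dictionary.map Prod.fst).Nodup) :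
    move_specific_keys_to_first dictionary ktm io
      = pvMovedD dictionary ktm ++ pvOthers dictionary ktm io := by
  have hchar : ∀ p ∈ ktm.filterMap (pvF dictionary) ++ pvOthers dictionary ktm io,
      (PySem.Dict.mk dictionary).get? p.1 = some p.2 := by
    intro p hp
    rcases List.mem_append.mp hp with hp | hp
    · exact ((mem_filterMapF ((PySem.Dict.mk dictionary).get?) ktm p).mp (by simpa [pvF] using hp)).2
    · have hpd : p ∈ dictionary := by
        cases io with
        | false => simp [pvOthers] at hp
        | true =>
          have h2 : p ∈ dictionary ∧ p.1 ∉ ktm := by simpa [pvOthers] using hp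
          exact h2.1
      exact (memget dictionary hn p).mpr hpd
  have hport : move_specific_keys_to_first dictionary ktm io
      = (PySem.Dict.ofList (ktm.filterMap (pvF dictionary) ++ pvOthers dictionary ktm io)).items := rfl
  rw [hport]
  simp only [PySem.Dict.ofList, PySem.Dict.update]
  rw [foldIns _ PySem.Dict.empty (by simp [PySem.Dict.keys, PySem.Dict.empty])
    (by intro p _ v hv; simp [PySem.Dict.get?, PySem.Dict.empty] at hv)
    (by
      intro p hp q hq hpq
      have h1 := hchar p hp
      have h2 := hchar q hq
      rw [hpq, h2] at h1
      exact (Option.some.inj h1).symm)]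
  have hrem_nd : ((pvOthers dictionary ktm io).map Prod.fst).Nodup := by
    cases io with
    | false => simp [pvOthers]
    | true =>
      rw [show pvOthers dictionary ktm true = dictionary.filter (fun p => !(ktm.contains p.1)) from rfl]
      rw [mapfst_filter dictionary (fun k => !(ktm.contains k))]
      exact hn.filter _
  have hdisj : ∀ k ∈ (pvOthers dictionary ktm io).map Prod.fst,
      k ∉ (PySem.Dict.empty (κ := String) (ν := Int)).keys ∧ k ∉ (ktm.filterMap (pvF dictionary)).map Prod.fst := by
    intro k hk
    cases io with
    | false => simp [pvOthers] at hk
    | true =>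
      rw [show pvOthers dictionary ktm true = dictionary.filter (fun p => !(ktm.contains p.1)) from rfl,
        mapfst_filter dictionary (fun k => !(ktm.contains k))] at hk
      have hnotk : k ∉ ktm := by
        have := (List.mem_filter.mp hk).2
        simpa using this
      refine ⟨by simp [PySem.Dict.keys, PySem.Dict.empty], fun hc => ?_⟩
      simp only [pvF, filterMapF_fst] at hc
      exact hnotk (List.mem_filter.mp hc).1
  rw [pvDedupK_congr _ _ [] (fun x _ => by simp [PySem.Dict.keys, PySem.Dict.empty]),
    pvDedupK_append _ _ [] hrem_nd (fun k hk => ⟨by simp, (hdisj k hk).2⟩)]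
  simp only [pvF, pvDedupK_filterMap]
  simp [PySem.Dict.keys, PySem.Dict.empty, pvMovedD, pvF]

theorem rank0_items (ktm : List String) :
    (ktm.foldl (fun r key => r.setdefault key ((r.size : Int))) PySem.Dict.empty).items
      = pvAssign ktm [] 0 := by
  have h := rank_items ktm PySem.Dict.empty []
    (fun x => by simp [PySem.Dict.contains, PySem.Dict.empty])
  simpa [PySem.Dict.empty, PySem.Dict.size] using h

theorem rank0_keys (ktm : List String) :
    (ktm.foldl (fun r key => r.setdefault key ((r.size : Int))) PySem.Dict.empty).keys
      = pvDedupS ktm [] := by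
  show List.map Prod.fst (ktm.foldl (fun r key => r.setdefault key ((r.size : Int))) PySem.Dict.empty).items = _
  rw [rank0_items, pvAssign_fst]

theorem sideB (dictionary : List (String × Int)) (ktm : List String) (io : Bool)
    (hn : (dictionary.map Prod.fst).Nodup) :
    move_specific_keys_to_first_alt dictionary ktm io
      = pvMovedD dictionary ktm ++ pvOthers dictionary ktm io := by
  have hdnd : dictionary.Nodup := hn.of_map
  have hmfst : (pvMovedD dictionary ktm).map Prod.fst
      = (pvDedupS ktm []).filter (fun k => ((PySem.Dict.mk dictionary).get? k).isSome) := by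
    simp only [pvMovedD, pvF, filterMapF_fst]
  have hmnd_keys : ((pvMovedD dictionary ktm).map Prod.fst).Nodup := by
    rw [hmfst]; exact (pvDedupS_nodup ktm []).filter _
  have hmmem : ∀ p : String × Int, p ∈ pvMovedD dictionary ktm ↔ p.1 ∈ ktm ∧ p ∈ dictionary := by
    intro p
    simp only [pvMovedD, pvF]
    rw [mem_filterMapF, pvDedupS_mem, memget dictionary hn p]
    simp
  cases io with
  | false =>
    set r0 := ktm.foldl (fun r key => r.setdefault key ((r.size : Int))) PySem.Dict.empty with hr0def
    have hkeys0 : r0.keys = pvDedupS ktm [] := rank0_keys ktm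
    have hnd0 : r0.keys.Nodup := by rw [hkeys0]; exact pvDedupS_nodup ktm []
    have hperm : (pvMovedD dictionary ktm).Perm
        (dictionary.filter (fun item => r0.contains item.1)) := by
      rw [List.perm_ext_iff_of_nodup (List.Nodup.of_map _ hmnd_keys) (hdnd.filter _)]
      intro a
      rw [hmmem a, List.mem_filter]
      constructor
      · rintro ⟨hk, hd⟩
        refine ⟨hd, ?_⟩
        rw [PySem.Dict.contains_iff_mem_keys, hkeys0, pvDedupS_mem]
        exact ⟨hk, by simp⟩
      · rintro ⟨hd, hc⟩
        rw [PySem.Dict.contains_iff_mem_keys, hkeys0, pvDedupS_mem] at hc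
        exact ⟨hc.1, hd⟩
    have hpair : (pvMovedD dictionary ktm).Pairwise
        (fun p q => ((r0.get? p.1).getD 0 : Int) < (r0.get? q.1).getD 0) := by
      apply transport r0 hnd0 _
        ((pvAssign ktm [] 0).filter (fun q => ((PySem.Dict.mk dictionary).get? q.1).isSome))
      · rw [hmfst, mapfst_filter (pvAssign ktm [] 0)
          (fun k => ((PySem.Dict.mk dictionary).get? k).isSome), pvAssign_fst]
      · rw [show r0.items = pvAssign ktm [] 0 from rank0_items ktm]
        exact List.filter_sublist
      · exact List.Pairwise.sublist List.filter_sublist (pvAssign_pairwise ktm [] 0)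
    have hsorted := PySem.List.sorted_eq_of_perm_of_pairwise_lt
        (dictionary.filter (fun item => r0.contains item.1)) (pvMovedD dictionary ktm)
        (fun item => ((r0.get? item.1).getD 0 : Int)) hperm hpair
    show (PySem.Dict.ofList (PySem.List.sorted
        (dictionary.filter (fun item => r0.contains item.1))
        (fun item => ((r0.get? item.1).getD 0 : Int)))).items
      = pvMovedD dictionary ktm ++ pvOthers dictionary ktm false
    rw [hsorted, ofList_items _ hmnd_keys]
    simp [pvOthers]
  | true =>
    set r0 := ktm.foldl (fun r key => r.setdefault key ((r.size : Int))) PySem.Dict.empty with hr0def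
    have h0 : r0.items = pvAssign ktm [] 0 := rank0_items ktm
    have hkeys0 : r0.keys = pvDedupS ktm [] := rank0_keys ktm
    set R := (dictionary.map Prod.fst).foldl (fun r key => r.setdefault key ((r.size : Int))) r0 with hRdef
    have hm : (r0.size : Int) = ((pvAssign ktm [] 0).length : Int) := by
      simp [PySem.Dict.size, h0]
    have hR : R.items = pvAssign ktm [] 0
        ++ pvAssign (dictionary.map Prod.fst) (pvDedupS ktm []) ((pvAssign ktm [] 0).length : Int) := by
      rw [hRdef]
      rw [rank_items (dictionary.map Prod.fst) r0 (pvDedupS ktm [])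
        (fun x => by rw [PySem.Dict.contains_iff_mem_keys, hkeys0])]
      rw [h0, hm]
    have hRnd : R.keys.Nodup := by
      have hk : R.keys = pvDedupS ktm []
          ++ pvDedupS (dictionary.map Prod.fst) (pvDedupS ktm []) := by
        show List.map Prod.fst R.items = _
        rw [hR, List.map_append, pvAssign_fst, pvAssign_fst]
      rw [hk, List.nodup_append]
      exact ⟨pvDedupS_nodup _ _, pvDedupS_nodup _ _,
        fun a ha b hb heq => ((pvDedupS_mem _ _ b).mp hb).2 (heq ▸ ha)⟩
    have hofst : (dictionary.filter (fun p => !(ktm.contains p.1))).map Prod.fst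
        = pvDedupS (dictionary.map Prod.fst) (pvDedupS ktm []) := by
      rw [mapfst_filter dictionary (fun k => !(ktm.contains k)), pvDedupS_eq_filter _ _ hn]
      apply List.filter_congr
      intro x _
      simp [pvDedupS_mem]
    have hond : ((dictionary.filter (fun p => !(ktm.contains p.1))).map Prod.fst).Nodup := by
      rw [mapfst_filter dictionary (fun k => !(ktm.contains k))]
      exact hn.filter _
    have hnodys : ((pvMovedD dictionary ktm ++ dictionary.filter (fun p => !(ktm.contains p.1))).map Prod.fst).Nodup := by
      rw [List.map_append, List.nodup_append]
      refine ⟨hmnd_keys, hond, ?_⟩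
      intro a ha b hb heq
      subst heq
      rw [hmfst] at ha
      have ha2 : a ∈ ktm := ((pvDedupS_mem ktm [] a).mp (List.mem_of_mem_filter ha)).1
      rw [mapfst_filter dictionary (fun k => !(ktm.contains k))] at hb
      have hb2 := (List.mem_filter.mp hb).2
      simp at hb2
      exact hb2 ha2
    have hperm : (pvMovedD dictionary ktm ++ dictionary.filter (fun p => !(ktm.contains p.1))).Perm dictionary := by
      rw [List.perm_ext_iff_of_nodup (List.Nodup.of_map _ hnodys) hdnd]
      intro a
      rw [List.mem_append, hmmem a, List.mem_filter]
      constructor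
      · rintro (⟨_, hd⟩ | ⟨hd, _⟩) <;> exact hd
      · intro hd
        by_cases hk : a.1 ∈ ktm
        · exact Or.inl ⟨hk, hd⟩
        · exact Or.inr ⟨hd, by simpa using hk⟩
    have hpair : (pvMovedD dictionary ktm ++ dictionary.filter (fun p => !(ktm.contains p.1))).Pairwise
        (fun p q => ((R.get? p.1).getD 0 : Int) < (R.get? q.1).getD 0) := by
      apply transport R hRnd _
        ((pvAssign ktm [] 0).filter (fun q => ((PySem.Dict.mk dictionary).get? q.1).isSome)
          ++ pvAssign (dictionary.map Prod.fst) (pvDedupS ktm []) ((pvAssign ktm [] 0).length : Int))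
      · simp only [List.map_append]
        rw [hmfst, hofst,
          mapfst_filter (pvAssign ktm [] 0) (fun k => ((PySem.Dict.mk dictionary).get? k).isSome),
          pvAssign_fst, pvAssign_fst]
      · rw [hR]
        exact List.Sublist.append List.filter_sublist (List.Sublist.refl _)
      · rw [List.pairwise_append]
        refine ⟨List.Pairwise.sublist List.filter_sublist (pvAssign_pairwise _ _ _),
          pvAssign_pairwise _ _ _, ?_⟩
        intro a ha b hb
        have h1 := pvAssign_ub ktm [] 0 a (List.mem_of_mem_filter ha)
        have h3 := pvAssign_lb (dictionary.map Prod.fst) (pvDedupS ktm []) _ b hb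
        omega
    have hsorted := PySem.List.sorted_eq_of_perm_of_pairwise_lt
        dictionary (pvMovedD dictionary ktm ++ dictionary.filter (fun p => !(ktm.contains p.1)))
        (fun item => ((R.get? item.1).getD 0 : Int)) hperm hpair
    show (PySem.Dict.ofList (PySem.List.sorted dictionary
        (fun item => ((R.get? item.1).getD 0 : Int)))).items
      = pvMovedD dictionary ktm ++ pvOthers dictionary ktm true
    rw [hsorted, ofList_items _ hnodys]
    rfl

-- ===== VERDICT =====
theorem move_specific_keys_to_first_spec : Claim_equal_move_specific_keys_to_first := by
  intro dictionary keys_to_move include_others _ hpre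
  have hn : (dictionary.map Prod.fst).Nodup := hpre
  show move_specific_keys_to_first dictionary keys_to_move include_others
    = move_specific_keys_to_first_alt dictionary keys_to_move include_others
  rw [sideA dictionary keys_to_move include_others hn,
    sideB dictionary keys_to_move include_others hn]
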